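-- pv_equiv track=rewrite | github.com/ChainsawRambo/NJIT-CS-100 | Practice Midterm 2 2015 Fall.py | importantWords
-- ===== SOURCE A (Python) =====
-- def importantWords(s,threshold):
--     d = {}
--     for word in s.split():
--         if len(word) >= threshold and word not in d:
--             d[word] = 0
--         if len(word) >= threshold and word in d:
--             d[word] += 1
--
--     return d
-- ===== SOURCE B (Python) =====
-- def importantWords(s, threshold):
--     # Count-and-remove recursion: take the first remaining word, count it by the
--     # length drop when all its copies are removed, recurse on the remainder.
--     def go(ws):
--         if not ws:
--             return []
--         w = ws[0]
--         rest = [x for x in ws[1:] if x != w]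
--         return [(w, len(ws) - len(rest))] + go(rest)
--     return dict(go([w for w in s.split() if len(w) >= threshold]))
-- ===== Notes on version B (the rewrite author's own statement) =====
-- stated objective: alternative
-- what changed: A accumulates counts in a dict in one pass with insert-then-increment; B is a count-and-remove recursion: it takes the first remaining long-enough word, derives its count from the length drop when all its copies are filtered out, recurses on the remainder, and builds the dict from the resulting pair list at the end.
import Mathlib
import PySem

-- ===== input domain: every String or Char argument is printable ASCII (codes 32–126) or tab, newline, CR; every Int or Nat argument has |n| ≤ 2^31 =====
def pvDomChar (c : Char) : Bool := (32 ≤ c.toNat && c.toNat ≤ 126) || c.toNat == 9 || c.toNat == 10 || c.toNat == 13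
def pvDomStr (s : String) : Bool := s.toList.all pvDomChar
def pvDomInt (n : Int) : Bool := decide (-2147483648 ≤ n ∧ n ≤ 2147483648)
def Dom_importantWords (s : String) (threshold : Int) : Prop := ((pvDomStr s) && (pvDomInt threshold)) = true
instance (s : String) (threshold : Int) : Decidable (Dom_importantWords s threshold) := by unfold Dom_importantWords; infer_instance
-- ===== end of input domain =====

-- B replaces A's single accumulating-counter pass by a count-and-remove recursion:
-- take the first remaining long-enough word, derive its count from the length drop when
-- its copies are filtered out, recurse on the remainder, build the dict from the pair list.

-- ===== PORT A =====
-- for word in s.split(): if len(word)>=threshold and word not in d: d[word]=0 ; if len(word)>=threshold and word in d: d[word]+=1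
def importantWords (s : String) (threshold : Int) : List (String × Int) :=
  ((PySem.Str.split₀ s).foldl (fun d word =>
      let d := if threshold ≤ PySem.Str.len word ∧ d.contains word = false then d.insert word 0 else d
      if threshold ≤ PySem.Str.len word ∧ d.contains word = true then d.modify word 0 (· + 1) else d)
    (PySem.Dict.empty : PySem.Dict String Int)).items

-- ===== PORT B =====
-- def go(ws): if not ws: return []; w = ws[0]; rest = [x for x in ws[1:] if x != w];
--             return [(w, len(ws) - len(rest))] + go(rest)
def goB : List String → List (String × Int)
  | [] => []
  | w :: t =>
    (w, ((w :: t).length : Int) - ((t.filter (fun x => x != w)).length : Int))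
      :: goB (t.filter (fun x => x != w))
termination_by l => l.length
decreasing_by
  simp only [List.unattach_filter, List.unattach_attach]
  exact Nat.lt_succ_of_le (t.length_filter_le _)

-- return dict(go([w for w in s.split() if len(w) >= threshold]))
def importantWords_alt (s : String) (threshold : Int) : List (String × Int) :=
  (PySem.Dict.ofList (goB ((PySem.Str.split₀ s).filter (fun w => decide (threshold ≤ PySem.Str.len w))))).items

-- ===== PRECONDITION & SPEC =====
def Spec_importantWords (s : String) (threshold : Int) (out : List (String × Int)) : Prop := out = importantWords_alt s threshold
instance (s : String) (threshold : Int) (out : List (String × Int)) : Decidable (Spec_importantWords s threshold out) := by unfold Spec_importantWords; infer_instance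

-- ===== CLAIM (what is proved, stated in full; the proofs are below) =====
def Claim_equal_importantWords : Prop := ∀ (s : String) (threshold : Int), Dom_importantWords s threshold → Spec_importantWords s threshold (importantWords s threshold)

-- ===== LEMMAS AND PROOFS =====

-- A's two guarded statements on one word equal one guarded 'modify +1'
lemma stepA_eq (threshold : Int) (d : PySem.Dict String Int) (word : String) :
    (let d := if threshold ≤ PySem.Str.len word ∧ d.contains word = false then d.insert word 0 else d
     if threshold ≤ PySem.Str.len word ∧ d.contains word = true then d.modify word 0 (· + 1) else d)
    = if threshold ≤ PySem.Str.len word then d.modify word 0 (· + 1) else d := by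
  by_cases ht : threshold ≤ (word.length : Int)
  · by_cases hc : d.contains word = true
    · simp [ht, hc]
    · simp only [Bool.not_eq_true] at hc
      simp [ht, hc, PySem.Dict.modify, PySem.Dict.getD_insert_self,
        PySem.Dict.insert_insert_self, PySem.Dict.getD_of_not_contains d (0 : Int) hc]
  · simp [ht]

lemma foldl_if_filter {α β : Type} (p : β → Prop) [DecidablePred p] (f : α → β → α) (l : List β) (init : α) :
    l.foldl (fun a x => if p x then f a x else a) init = (l.filter (fun x => decide (p x))).foldl f init := by
  induction l generalizing init with
  | nil => rfl
  | cons x xs ih => simp only [List.foldl_cons, List.filter_cons]; split <;> simp_all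

-- filtering commutes with ordered dedup
lemma filter_ofList {α : Type} [BEq α] [LawfulBEq α] (p : α → Bool) (t : List α) :
    (PySem.Set.ofList t).filter p = PySem.Set.ofList (t.filter p) := by
  induction t with
  | nil => rfl
  | cons a t ih =>
    by_cases hp : p a = true
    · simp only [PySem.Set.ofList_cons, List.filter_cons, hp, if_true, PySem.Set.discard,
        List.filter_filter, ← ih]
      congr 1
      apply List.filter_congr
      intro x _
      simp [Bool.and_comm]
    · simp only [Bool.not_eq_true] at hp
      simp only [PySem.Set.ofList_cons, List.filter_cons, hp, Bool.false_eq_true, if_false,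
        PySem.Set.discard, List.filter_filter, ← ih]
      apply List.filter_congr
      intro x _
      by_cases hx : x = a <;> simp [hx, hp]

-- the count-and-remove recursion lists the distinct words in first-occurrence order with their counts
lemma goB_eq (l : List String) :
    goB l = (PySem.Set.ofList l).map (fun k => (k, (l.count k : Int))) := by
  induction l using goB.induct with
  | case1 => simp [goB]
  | case2 w t ih =>
    simp only [List.unattach_filter, List.unattach_attach] at ih
    rw [goB]
    have hof : PySem.Set.ofList (w :: t)
        = w :: PySem.Set.ofList (t.filter (fun x => x != w)) := by
      rw [PySem.Set.ofList_cons, ← filter_ofList]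
      rfl
    rw [hof, List.map_cons]
    congr 1
    · have hsplit : (t.filter (fun x => x != w)).length + t.count w = t.length := by
        rw [← List.countP_eq_length_filter, List.count]
        have h0 := List.length_eq_countP_add_countP (p := fun x => x != w) (l := t)
        have h2 : t.countP (fun x => ¬(x != w) = true) = t.countP (· == w) := by
          apply List.countP_congr; intro x _
          by_cases hx : x = w <;> simp [hx]
        omega
      have hcw : (w :: t).count w = t.count w + 1 := List.count_cons_self
      rw [hcw]
      have h1 : ((w :: t).length : Int) - ((t.filter (fun x => x != w)).length : Int)
          = ((t.count w + 1 : Nat) : Int) := by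
        simp only [List.length_cons]
        omega
      rw [h1]
    · rw [ih]
      apply List.map_congr_left
      intro k hk
      have hkr : k ∈ t.filter (fun x => x != w) := (PySem.Set.mem_ofList _ _).mp hk
      have hkw : k ≠ w := by
        have := (List.mem_filter.mp hkr).2
        simpa using this
      have hc : (t.filter (fun x => x != w)).count k = t.count k := by
        rw [List.count_filter]
        simp [hkw]
      rw [hc]
      simp [Ne.symm hkw]

-- dict(pairs) lists the pairs unchanged when their keys are distinct
lemma items_ofList_goB (l : List String) :
    (PySem.Dict.ofList (goB l)).items = goB l := by
  have hfst : (goB l).map Prod.fst = PySem.Set.ofList l := by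
    rw [goB_eq, List.map_map]
    exact List.map_id _
  have hnd : ((goB l).map Prod.fst).Nodup := by
    rw [hfst]; exact PySem.Set.nodup_ofList l
  have h := PySem.Dict.items_foldl_insert_fresh (goB l) Prod.fst Prod.snd
    (PySem.Dict.empty : PySem.Dict String Int)
    (by intro a _; simp [PySem.Dict.contains_empty]) hnd
  simpa [PySem.Dict.ofList, PySem.Dict.update, PySem.Dict.empty] using h

-- ===== VERDICT (by name: the statement is the Claim_ definition above) =====
theorem importantWords_spec : Claim_equal_importantWords := by
  intro s threshold _
  show _ = _
  unfold importantWords importantWords_alt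
  have hf : (fun (d : PySem.Dict String Int) (word : String) =>
      let d := if threshold ≤ PySem.Str.len word ∧ d.contains word = false then d.insert word 0 else d
      if threshold ≤ PySem.Str.len word ∧ d.contains word = true then d.modify word 0 (· + 1) else d)
      = fun d word => if threshold ≤ PySem.Str.len word then d.modify word 0 (· + 1) else d := by
    funext d word; exact stepA_eq threshold d word
  rw [hf, foldl_if_filter (fun w => threshold ≤ PySem.Str.len w)
        (fun (d : PySem.Dict String Int) w => d.modify w 0 (· + 1)) (PySem.Str.split₀ s) PySem.Dict.empty,
      ← PySem.Dict.counter_eq_foldl, PySem.Dict.items_counter, items_ofList_goB, goB_eq]
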